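-- pv_equiv track=rewrite | github.com/jviterbo/bbl2html-converter | conversor_bbl2html.py | limpa_url
-- ===== SOURCE A (Python) =====
-- def limpa_url(linha):
--     if '\\url' in linha:
--         link = ''
--         novalinha = ''
--         k = linha.rfind("\\url")
--         achou = False
--         for i in range(len(linha)):
--             if i < k:
--                 novalinha = novalinha + linha[i]
--             elif i > k+4:
--                 if linha[i] == '}' and achou == False:
--                     novalinha = novalinha + '[<a href=\"' + link + '\">link</a>]'
--                     achou = True
--                 elif achou == False:
--                     link = link + linha[i]
--                 else:
--                     novalinha = novalinha + linha[i]
--         novalinha = novalinha.replace('Available at:{[', 'Available online {[')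
--         novalinha = novalinha.replace('Available at: {[', 'Available online {[')
--         return novalinha
--     else:
--         return linha
-- ===== SOURCE B (Python) =====
-- def limpa_url(linha):
--     if '\\url' in linha:
--         k = linha.rfind('\\url')
--         before = linha[:k]
--         after = linha[k+5:]
--         j = after.find('}')
--         if j == -1:
--             novalinha = before
--         else:
--             novalinha = before + '[<a href="' + after[:j] + '">link</a>]' + after[j+1:]
--         novalinha = novalinha.replace('Available at:{[', 'Available online {[')
--         novalinha = novalinha.replace('Available at: {[', 'Available online {[')
--         return novalinha
--     return linha
-- ===== Notes on version B (the rewrite author's own statement) =====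
-- stated objective: simpler
-- what changed: Replaces A's index-by-index scan with flag state (link/novalinha/achou accumulators over range(len(linha))) by a direct decomposition using rfind/find and three string slices around the \url{...} occurrence.
import Mathlib
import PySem

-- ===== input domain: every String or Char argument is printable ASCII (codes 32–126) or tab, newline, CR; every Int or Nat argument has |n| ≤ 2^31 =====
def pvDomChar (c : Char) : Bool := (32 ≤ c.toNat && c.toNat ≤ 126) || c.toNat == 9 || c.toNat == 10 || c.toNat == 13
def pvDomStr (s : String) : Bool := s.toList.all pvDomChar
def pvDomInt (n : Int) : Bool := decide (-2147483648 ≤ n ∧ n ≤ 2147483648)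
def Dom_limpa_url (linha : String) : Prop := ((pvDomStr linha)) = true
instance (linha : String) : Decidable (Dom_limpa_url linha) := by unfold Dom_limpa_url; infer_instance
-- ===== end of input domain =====

-- B replaces A's scan-with-flag character loop by rfind/find and slicing; objective: simpler.

-- ===== PORT A =====
-- state = (link, novalinha, achou); loop body of A, at index i
def limpaStep (s : List Char) (k : Int) (st : List Char × List Char × Bool) (i : Int) :
    List Char × List Char × Bool :=
  if i < k then (st.1, st.2.1 ++ [PySem.List.pyGetD s i ' '], st.2.2)
  else if i > k + 4 then
    (if PySem.List.pyGetD s i ' ' = '}' ∧ st.2.2 = false then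
      (st.1, st.2.1 ++ "[<a href=\"".toList ++ st.1 ++ "\">link</a>]".toList, true)
    else if st.2.2 = false then (st.1 ++ [PySem.List.pyGetD s i ' '], st.2.1, false)
    else (st.1, st.2.1 ++ [PySem.List.pyGetD s i ' '], st.2.2))
  else st

def limpa_url (linha : String) : String :=
  if PySem.Str.isIn "\\url" linha then
    let s := linha.toList
    let k : Int := PySem.Str.rfind linha "\\url"
    let st := (PySem.List.pyRange 0 (s.length : Int)).foldl (limpaStep s k) ([], [], false)
    let nova := PySem.Chars.replace st.2.1 "Available at:{[".toList "Available online {[".toList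
    let nova := PySem.Chars.replace nova "Available at: {[".toList "Available online {[".toList
    String.ofList nova
  else linha

-- ===== PORT B =====
def limpa_url_alt (linha : String) : String :=
  if PySem.Str.isIn "\\url" linha then
    let s := linha.toList
    let k : Int := PySem.Str.rfind linha "\\url"
    let before := PySem.List.slice s none (some k)
    let after := PySem.List.slice s (some (k + 5)) none
    let j : Int := PySem.Chars.find after "}".toList
    let nova :=
      if j = -1 then before
      else before ++ "[<a href=\"".toList ++ PySem.List.slice after none (some j)
        ++ "\">link</a>]".toList ++ PySem.List.slice after (some (j + 1)) none
    let nova := PySem.Chars.replace nova "Available at:{[".toList "Available online {[".toList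
    let nova := PySem.Chars.replace nova "Available at: {[".toList "Available online {[".toList
    String.ofList nova
  else linha

-- ===== PRECONDITION & SPEC =====
def Spec_limpa_url (linha : String) (out : String) : Prop := out = limpa_url_alt linha
instance (linha : String) (out : String) : Decidable (Spec_limpa_url linha out) := by unfold Spec_limpa_url; infer_instance

-- ===== CLAIM (what is proved, stated in full; the proofs are below) =====
def Claim_equal_limpa_url : Prop := ∀ (linha : String), Dom_limpa_url linha → Spec_limpa_url linha (limpa_url linha)

-- ===== LEMMAS AND PROOFS =====

-- the per-character flag machine that A's loop runs past index k+4
def machineStep (st : List Char × List Char × Bool) (c : Char) : List Char × List Char × Bool :=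
  if c = '}' ∧ st.2.2 = false then
    (st.1, st.2.1 ++ "[<a href=\"".toList ++ st.1 ++ "\">link</a>]".toList, true)
  else if st.2.2 = false then (st.1 ++ [c], st.2.1, false)
  else (st.1, st.2.1 ++ [c], st.2.2)

theorem rfind_go_nonneg (s sub : List Char) (m : Nat)
    (h : ∃ i ≤ m, sub <+: s.drop i) : 0 ≤ PySem.Chars.rfind.go s sub m := by
  induction m with
  | zero =>
      obtain ⟨i, hi, hp⟩ := h
      have h0 : i = 0 := by omega
      subst h0
      simp only [List.drop_zero] at hp
      rw [show PySem.Chars.rfind.go s sub 0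
            = if sub.isPrefixOf s then (0:Int) else -1 from rfl]
      rw [if_pos (List.isPrefixOf_iff_prefix.mpr hp)]
  | succ j ih =>
      rw [show PySem.Chars.rfind.go s sub (j+1)
            = if sub.isPrefixOf (List.drop (j+1) s) then ((j+1:Nat):Int)
              else PySem.Chars.rfind.go s sub j from rfl]
      by_cases hp : sub.isPrefixOf (List.drop (j + 1) s) = true
      · rw [if_pos hp]; positivity
      · rw [if_neg hp]
        obtain ⟨i, hi, hpre⟩ := h
        have hij : i ≤ j := by
          by_contra hc
          have : i = j + 1 := by omega
          subst this
          exact hp (List.isPrefixOf_iff_prefix.mpr hpre)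
        exact ih ⟨i, hij, hpre⟩

theorem rfind_nonneg (s sub : List Char) (h : PySem.Chars.isIn sub s = true) :
    0 ≤ PySem.Chars.rfind s sub := by
  rw [← PySem.Chars.exists_prefix_drop_iff_isIn] at h
  obtain ⟨j, hj⟩ := h
  apply rfind_go_nonneg
  rcases Nat.le_total j s.length with hle | hle
  · exact ⟨j, hle, hj⟩
  · refine ⟨s.length, le_rfl, ?_⟩
    rw [List.drop_eq_nil_of_le hle] at hj
    have : sub = [] := List.prefix_nil.mp hj
    simp [this]

-- a segment of indices read from s yields the corresponding segment of s
theorem seg_map (s : List Char) (a m : Nat) (h : a + m ≤ s.length) :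
    (List.range' a m).map (fun (i : Nat) => PySem.List.pyGetD s (i : Int) ' ') = (s.drop a).take m := by
  induction m generalizing a with
  | zero => simp
  | succ m ih =>
      have ha : a < s.length := by omega
      rw [List.range'_succ]
      simp only [List.map_cons]
      rw [PySem.List.pyGetD_natCast, ih (a+1) (by omega)]
      conv_rhs => rw [List.drop_eq_getElem_cons ha]
      rw [List.take_succ_cons]
      congr 1
      simp [ha]

theorem phase1 (s : List Char) (k : Int) (l : List Int) (hl : ∀ i ∈ l, i < k)
    (link nova : List Char) (b : Bool) :
    l.foldl (limpaStep s k) (link, nova, b)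
      = (link, nova ++ l.map (fun i => PySem.List.pyGetD s i ' '), b) := by
  induction l generalizing nova with
  | nil => simp
  | cons x t ih =>
      have hx : x < k := hl x (by simp)
      simp only [List.foldl_cons, List.map_cons, limpaStep, if_pos hx]
      rw [ih (fun i hi => hl i (by simp [hi]))]
      simp

theorem phase2 (s : List Char) (k : Int) (l : List Int)
    (hl : ∀ i ∈ l, k ≤ i ∧ i ≤ k + 4) (st : List Char × List Char × Bool) :
    l.foldl (limpaStep s k) st = st := by
  induction l with
  | nil => simp
  | cons x t ih =>
      have hx := hl x (by simp)
      simp only [List.foldl_cons, limpaStep]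
      rw [if_neg (by omega), if_neg (by omega)]
      exact ih (fun i hi => hl i (by simp [hi]))

theorem phase3 (s : List Char) (k : Int) (l : List Int) (hl : ∀ i ∈ l, k + 4 < i)
    (st : List Char × List Char × Bool) :
    l.foldl (limpaStep s k) st
      = (l.map (fun i => PySem.List.pyGetD s i ' ')).foldl machineStep st := by
  induction l generalizing st with
  | nil => simp
  | cons x t ih =>
      have hx := hl x (by simp)
      simp only [List.foldl_cons, List.map_cons]
      rw [show limpaStep s k st x = machineStep st (PySem.List.pyGetD s x ' ') by
        simp only [limpaStep, machineStep]; rw [if_neg (by omega), if_pos (by omega)]]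
      exact ih (fun i hi => hl i (by simp [hi])) _

theorem machine_true (cs link nova : List Char) :
    cs.foldl machineStep (link, nova, true) = (link, nova ++ cs, true) := by
  induction cs generalizing nova with
  | nil => simp
  | cons c t ih => simp [machineStep, ih]

theorem machine_no (cs : List Char) (h : '}' ∉ cs) (link nova : List Char) :
    cs.foldl machineStep (link, nova, false) = (link ++ cs, nova, false) := by
  induction cs generalizing link with
  | nil => simp
  | cons c t ih =>
      simp only [List.mem_cons, not_or] at h
      rw [List.foldl_cons, show machineStep (link, nova, false) c = (link ++ [c], nova, false) from by
        simp only [machineStep]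
        rw [if_neg (by rintro ⟨hc, -⟩; exact h.1 hc.symm), if_pos (by trivial)]]
      rw [ih h.2]
      simp

theorem machine_yes (tw rest : List Char) (h : '}' ∉ tw) (link nova : List Char) :
    (tw ++ '}' :: rest).foldl machineStep (link, nova, false)
      = (link ++ tw, nova ++ "[<a href=\"".toList ++ (link ++ tw) ++ "\">link</a>]".toList ++ rest, true) := by
  induction tw generalizing link with
  | nil =>
      simp only [List.nil_append, List.foldl_cons, machineStep]
      rw [if_pos (by simp)]
      simp [machine_true]
  | cons c t ih =>
      simp only [List.mem_cons, not_or] at h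
      rw [List.cons_append, List.foldl_cons, show machineStep (link, nova, false) c = (link ++ [c], nova, false) from by
        simp only [machineStep]
        rw [if_neg (by rintro ⟨hc, -⟩; exact h.1 hc.symm), if_pos (by trivial)]]
      rw [ih h.2]
      simp

theorem find_singleton_none (cs : List Char) (c : Char) (h : c ∉ cs) :
    PySem.Chars.find cs [c] = -1 := by
  rw [PySem.Chars.find_eq_neg_one_iff]
  intro hinf
  exact h (hinf.mem (by simp))

theorem find_singleton_some (cs : List Char) (c : Char) (h : c ∈ cs) :
    ∃ jn : Nat, PySem.Chars.find cs [c] = (jn : Int) ∧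
      cs = cs.take jn ++ c :: cs.drop (jn + 1) ∧ c ∉ cs.take jn := by
  have h0 : 0 ≤ PySem.Chars.find cs [c] := by
    rw [PySem.Chars.find_nonneg_iff]
    obtain ⟨p, q, rfl⟩ := List.append_of_mem h
    exact ⟨p, q, by simp⟩
  obtain ⟨hpre, hmin⟩ := PySem.Chars.find_spec h0
  set jn := (PySem.Chars.find cs [c]).toNat with hjn
  obtain ⟨t, ht⟩ := hpre
  have hd : cs.drop jn = c :: t := by rw [← ht]; rfl
  have hdrop1 : cs.drop (jn + 1) = t := by
    rw [show jn + 1 = jn + 1 from rfl, ← List.drop_drop, hd]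
    simp
  refine ⟨jn, by omega, ?_, ?_⟩
  · conv_lhs => rw [← List.take_append_drop jn cs]
    rw [hd, hdrop1]
  · intro hmem
    obtain ⟨i, hi, hgi⟩ := List.getElem_of_mem hmem
    have hjlen : jn ≤ cs.length := by
      by_contra hc
      have : cs.drop jn = [] := List.drop_eq_nil_of_le (by omega)
      rw [this] at hd; simp at hd
    have hi' : i < jn := by
      have := List.length_take_le jn cs
      have h2 : (List.take jn cs).length = min jn cs.length := List.length_take
      omega
    apply hmin i hi'
    have hilen : i < cs.length := by omega
    rw [List.drop_eq_getElem_cons hilen]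
    have : cs[i] = c := by rw [← hgi]; simp [List.getElem_take]
    simp [this]

theorem take_min (s : List Char) (K n : Nat) (h : s.length ≤ n) : s.take (min K n) = s.take K := by
  rcases Nat.le_total K n with h' | h'
  · simp [Nat.min_eq_left h']
  · rw [Nat.min_eq_right h', List.take_of_length_le h, List.take_of_length_le (le_trans h h')]

theorem drop_min (s : List Char) (K n : Nat) (h : s.length ≤ n) : s.drop (min K n) = s.drop K := by
  rcases Nat.le_total K n with h' | h'
  · simp [Nat.min_eq_left h']
  · rw [Nat.min_eq_right h', List.drop_eq_nil_of_le h, List.drop_eq_nil_of_le (le_trans h h')]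

-- the core: A's loop equals B's slice decomposition, for any nonnegative k = ↑K
theorem core_eq (s : List Char) (K : Nat) :
    ((PySem.List.pyRange 0 (s.length : Int)).foldl (limpaStep s (↑K)) ([], [], false)).2.1
      = (if PySem.Chars.find (s.drop (K+5)) ['}'] = -1 then s.take K
        else s.take K ++ "[<a href=\"".toList
          ++ (s.drop (K+5)).take (PySem.Chars.find (s.drop (K+5)) ['}']).toNat
          ++ "\">link</a>]".toList
          ++ (s.drop (K+5)).drop ((PySem.Chars.find (s.drop (K+5)) ['}']).toNat + 1)) := by
  rw [PySem.List.pyRange_zero_natCast]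
  set n := s.length with hn
  have e1 : List.range' 0 (min K n) ++ List.range' (0 + min K n) (min (K+5) n - min K n)
      = List.range' 0 (min K n + (min (K+5) n - min K n)) := List.range'_append_1
  have e2 : List.range' 0 (min (K+5) n) ++ List.range' (0 + min (K+5) n) (n - min (K+5) n)
      = List.range' 0 (min (K+5) n + (n - min (K+5) n)) := List.range'_append_1
  simp only [Nat.zero_add] at e1 e2
  rw [show min K n + (min (K+5) n - min K n) = min (K+5) n from by omega] at e1
  rw [show min (K+5) n + (n - min (K+5) n) = n from by omega] at e2
  have hsplit : List.range n = List.range' 0 (min K n) ++ List.range' (min K n) (min (K+5) n - min K n)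
      ++ List.range' (min (K+5) n) (n - min (K+5) n) := by
    rw [List.range_eq_range', ← e2, ← e1]
  rw [hsplit]
  simp only [List.map_append, List.foldl_append]
  have hl1 : ∀ i ∈ (List.range' 0 (min K n)).map (fun (x : Nat) => (x : Int)), i < (K : Int) := by
    intro i hi
    simp only [List.mem_map, List.mem_range'_1] at hi
    obtain ⟨x, hx, rfl⟩ := hi
    omega
  have hl2 : ∀ i ∈ (List.range' (min K n) (min (K+5) n - min K n)).map (fun (x : Nat) => (x : Int)),
      (K : Int) ≤ i ∧ i ≤ (K : Int) + 4 := by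
    intro i hi
    simp only [List.mem_map, List.mem_range'_1] at hi
    obtain ⟨x, hx, rfl⟩ := hi
    constructor <;> omega
  have hl3 : ∀ i ∈ (List.range' (min (K+5) n) (n - min (K+5) n)).map (fun (x : Nat) => (x : Int)),
      (K : Int) + 4 < i := by
    intro i hi
    simp only [List.mem_map, List.mem_range'_1] at hi
    obtain ⟨x, hx, rfl⟩ := hi
    omega
  rw [phase1 s (↑K) ((List.range' 0 (min K n)).map (fun (x : Nat) => (x : Int))) hl1]
  rw [phase2 s (↑K) ((List.range' (min K n) (min (K+5) n - min K n)).map (fun (x : Nat) => (x : Int))) hl2]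
  rw [phase3 s (↑K) ((List.range' (min (K+5) n) (n - min (K+5) n)).map (fun (x : Nat) => (x : Int))) hl3]
  rw [List.map_map, List.map_map]
  rw [show ((fun i => PySem.List.pyGetD s i ' ') ∘ fun (x : Nat) => (x : Int))
        = fun (x : Nat) => PySem.List.pyGetD s (x : Int) ' ' from rfl]
  rw [seg_map s 0 (min K n) (by omega), seg_map s (min (K+5) n) (n - min (K+5) n) (by omega)]
  simp only [List.drop_zero, List.nil_append]
  rw [take_min s K n (by omega), drop_min s (K+5) n (by omega)]
  have hseg3 : List.take (n - min (K+5) n) (s.drop (K+5)) = s.drop (K+5) :=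
    List.take_of_length_le (by rw [List.length_drop]; omega)
  rw [hseg3]
  set cs := s.drop (K+5) with hcs
  by_cases hmem : '}' ∈ cs
  · obtain ⟨jn, hj, hdec, hnot⟩ := find_singleton_some cs '}' hmem
    rw [hj, if_neg (by omega)]
    conv_lhs => rw [hdec]
    rw [machine_yes _ _ hnot]
    simp
  · rw [machine_no cs hmem, find_singleton_none cs '}' hmem, if_pos rfl]

-- ===== VERDICT (by name: the statement is the Claim_ definition above) =====
theorem limpa_url_spec : Claim_equal_limpa_url := by
  intro linha _
  unfold Spec_limpa_url limpa_url limpa_url_alt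
  by_cases h : PySem.Str.isIn "\\url" linha = true
  · rw [if_pos h, if_pos h]
    dsimp only
    have hk : 0 ≤ PySem.Str.rfind linha "\\url" := by
      rw [PySem.Str.rfind_eq]
      apply rfind_nonneg
      rw [← PySem.Str.isIn_eq]
      exact h
    set K : Nat := (PySem.Str.rfind linha "\\url").toNat with hKdef
    have hkK : PySem.Str.rfind linha "\\url" = (K : Int) := by omega
    rw [hkK]
    rw [show ("}".toList : List Char) = ['}'] from rfl]
    rw [core_eq linha.toList K]
    set s := linha.toList with hs
    have hbefore : PySem.List.slice s none (some ((K : Nat) : Int)) = s.take K := by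
      rw [PySem.List.slice_to s (by positivity)]
      simp
    have hafter : PySem.List.slice s (some (((K : Nat) : Int) + 5)) none = s.drop (K+5) := by
      rw [PySem.List.slice_from s (by positivity), show (((K : Nat) : Int) + 5).toNat = K + 5 from by omega]
    rw [hbefore, hafter]
    set cs := s.drop (K+5) with hcs
    set j : Int := PySem.Chars.find cs ['}'] with hj
    by_cases hjn : j = -1
    · rw [if_pos hjn, if_pos hjn]
    · rw [if_neg hjn, if_neg hjn]
      have hj0 : 0 ≤ j := by
        have := PySem.Chars.neg_one_le_find cs ['}']
        rw [← hj] at this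
        omega
      rw [PySem.List.slice_to cs hj0, PySem.List.slice_from cs (by omega)]
      rw [show (j + 1).toNat = j.toNat + 1 by omega]
  · rw [if_neg h, if_neg h]
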